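-- pv_equiv track=rewrite | github.com/boisgera/eul-ink | docs/complex-analysis/Line Integrals & Primitives/images/main.py | koch_seq
-- ===== SOURCE A (Python) =====
-- def koch_seq(n=1, seq=None):
--     if seq is None:
--         seq = [2,2,2]
--     if n == 1:
--         return seq
--     else:
--         seq2 = []
--         for c in seq:
--             seq2.extend([c, -1, 2, -1])
--         return koch_seq(n-1, seq2)
-- ===== SOURCE B (Python) =====
-- def koch_seq(n=1, seq=None):
--     # Iterative rewrite: repeat the 4-way expansion n-1 times; same result, no recursion.
--     if seq is None:
--         seq = [2, 2, 2]
--     for _ in range(n - 1):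
--         seq = [x for c in seq for x in (c, -1, 2, -1)]
--     return seq
-- ===== Notes on version B (the rewrite author's own statement) =====
-- stated objective: simpler
-- what changed: Replaces the tail recursion with an iterative loop running n-1 times, each pass rebuilding the sequence with a flat comprehension instead of an accumulator extended in an inner loop.
import Mathlib
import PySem

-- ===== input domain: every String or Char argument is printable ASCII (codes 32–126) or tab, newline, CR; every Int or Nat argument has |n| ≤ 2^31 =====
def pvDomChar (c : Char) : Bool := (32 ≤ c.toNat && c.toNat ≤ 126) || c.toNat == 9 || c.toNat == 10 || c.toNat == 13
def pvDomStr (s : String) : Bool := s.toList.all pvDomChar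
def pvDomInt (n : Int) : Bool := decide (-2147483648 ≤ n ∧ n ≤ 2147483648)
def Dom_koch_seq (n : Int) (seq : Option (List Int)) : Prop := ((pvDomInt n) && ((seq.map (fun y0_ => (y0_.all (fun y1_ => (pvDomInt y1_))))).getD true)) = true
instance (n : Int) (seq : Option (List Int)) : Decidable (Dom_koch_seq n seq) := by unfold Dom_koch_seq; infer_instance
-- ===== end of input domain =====

-- B replaces A's tail recursion by an iterative loop over range(n-1), each pass
-- rebuilding the sequence with a flat comprehension (objective: simpler).


-- ===== PORT A =====
-- Literal port of A; the 'else s' branch is a totality guard only: for n ≤ 0 the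
-- Python recurses without returning (excluded by Pre_).
def koch_seq (n : Int) (seq : Option (List Int)) : List Int :=
  if n = 1 then seq.getD [2, 2, 2]
  else if h : 1 < n then
    koch_seq (n - 1) (some ((seq.getD [2, 2, 2]).foldl (fun acc c => acc ++ [c, -1, 2, -1]) []))
  else seq.getD [2, 2, 2]
termination_by n.toNat
decreasing_by omega

-- ===== PORT B =====
def koch_seq_alt (n : Int) (seq : Option (List Int)) : List Int :=
  (PySem.List.pyRange 0 (n - 1) 1).foldl
    (fun cur _ => cur.flatMap (fun c => [c, -1, 2, -1])) (seq.getD [2, 2, 2])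

-- ===== PRECONDITION & SPEC =====
-- Pre_ excludes n ≤ 0, on which A's recursion never returns (it decrements past 1 forever).
def Pre_koch_seq (n : Int) (seq : Option (List Int)) : Prop := 1 ≤ n
instance (n : Int) (seq : Option (List Int)) : Decidable (Pre_koch_seq n seq) := by unfold Pre_koch_seq; infer_instance
def pvWitness_koch_seq : Int × Option (List Int) := (3, some [1, 2])

def Spec_koch_seq (n : Int) (seq : Option (List Int)) (out : List Int) : Prop := out = koch_seq_alt n seq
instance (n : Int) (seq : Option (List Int)) (out : List Int) : Decidable (Spec_koch_seq n seq out) := by unfold Spec_koch_seq; infer_instance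

-- ===== CLAIM (what is proved, stated in full; the proofs are below) =====
def Claim_equal_koch_seq : Prop := ∀ (n : Int) (seq : Option (List Int)), Dom_koch_seq n seq → Pre_koch_seq n seq → Spec_koch_seq n seq (koch_seq n seq)

-- ===== LEMMAS AND PROOFS =====

def kochStep (s : List Int) : List Int := s.flatMap (fun c => [c, -1, 2, -1])

theorem foldl_const_iterate {α β : Type} (g : α → α) (l : List β) (s : α) :
    l.foldl (fun cur _ => g cur) s = g^[l.length] s := by
  induction l generalizing s with
  | nil => rfl
  | cons x xs ih => simp [List.foldl_cons, ih, Function.iterate_succ_apply]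

theorem koch_seq_eq_iterate (k : Nat) (seq : Option (List Int)) :
    koch_seq ((k : Int) + 1) seq = kochStep^[k] (seq.getD [2, 2, 2]) := by
  induction k generalizing seq with
  | zero => simp [koch_seq]
  | succ m ih =>
    rw [koch_seq]
    push_cast
    have h1 : ¬ ((m : Int) + 1 + 1 = 1) := by omega
    have h2 : (1 : Int) < (m : Int) + 1 + 1 := by omega
    rw [if_neg h1, dif_pos h2]
    have hs : (((m : Int) + 1 + 1) - 1) = (m : Int) + 1 := by ring
    rw [hs, PySem.List.foldl_append_eq_flatMap, List.nil_append, ih]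
    rw [Function.iterate_succ_apply]
    rfl

theorem koch_seq_alt_eq_iterate (k : Nat) (seq : Option (List Int)) :
    koch_seq_alt ((k : Int) + 1) seq = kochStep^[k] (seq.getD [2, 2, 2]) := by
  unfold koch_seq_alt kochStep
  rw [foldl_const_iterate (fun cur : List Int => cur.flatMap (fun c => [c, -1, 2, -1])),
      PySem.List.length_pyRange_one]
  have h : (((k : Int) + 1 - 1) - 0).toNat = k := by omega
  rw [h]

-- ===== VERDICT (by name: the statement is the Claim_ definition above) =====
theorem koch_seq_spec : Claim_equal_koch_seq := by
  intro n seq _ hpre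
  have h1 : 1 ≤ n := hpre
  obtain ⟨k, hk⟩ : ∃ k : Nat, n = (k : Int) + 1 := ⟨(n - 1).toNat, by omega⟩
  subst hk
  unfold Spec_koch_seq
  rw [koch_seq_eq_iterate, koch_seq_alt_eq_iterate]
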